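-- pv_equiv track=rewrite | github.com/xiejiangzhao/MIPS_Predict | Instruction_Translate.py | ins_decode
-- ===== SOURCE A (Python) =====
-- def ins_decode(instruction):
--     temp1=instruction.replace(',','%')
--     temp2=temp1.replace('(','%')
--     temp3=temp2.replace(')','%')
--     temp4=temp3.replace(' ','%')
--     temp5=temp4.split('%')
--     while '' in temp5:
--         temp5.remove('')
--     return temp5
-- ===== SOURCE B (Python) =====
-- def ins_decode(instruction):
--     # single pass: collect maximal runs of non-delimiter characters
--     # ('%' is a delimiter too: A's '%' sentinel makes it split tokens)
--     tokens = []
--     buf = []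
--     for ch in instruction:
--         if ch in ',() %':
--             if buf:
--                 tokens.append(''.join(buf))
--                 buf = []
--         else:
--             buf.append(ch)
--     if buf:
--         tokens.append(''.join(buf))
--     return tokens
-- ===== Notes on version B (the rewrite author's own statement) =====
-- stated objective: simpler
-- what changed: A makes four replace passes onto a percent sentinel, splits on it, then removes empty strings with a quadratic while-loop; B is a single left-to-right scan with a buffer that emits each maximal run of non-delimiter characters (comma, parentheses, space, and percent, which A's sentinel also splits on).
import Mathlib
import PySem

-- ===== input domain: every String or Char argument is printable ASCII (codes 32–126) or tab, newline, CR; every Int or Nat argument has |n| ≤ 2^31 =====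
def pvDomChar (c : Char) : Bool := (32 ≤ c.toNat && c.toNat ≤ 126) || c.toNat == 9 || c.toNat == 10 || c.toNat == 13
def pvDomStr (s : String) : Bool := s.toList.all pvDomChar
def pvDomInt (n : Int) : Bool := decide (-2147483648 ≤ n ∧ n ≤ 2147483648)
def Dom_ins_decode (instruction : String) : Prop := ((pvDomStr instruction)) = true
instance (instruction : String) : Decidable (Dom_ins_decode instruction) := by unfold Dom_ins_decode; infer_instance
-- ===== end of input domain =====

-- B replaces A's four replace-passes + split + while-remove loop by one scan collecting
-- maximal runs of non-delimiter characters (comma, parentheses, space, and the percent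
-- character, which A's sentinel also splits on); objective: simpler single pass.

-- ===== PORT A =====
-- while '' in temp5: temp5.remove('')
def pvRemoveLoop (l : List String) : List String :=
  match h : PySem.List.remove? l "" with
  | some l' => pvRemoveLoop l'
  | none => l
termination_by l.length
decreasing_by
  have hm : "" ∈ l := by
    by_contra hn
    rw [(PySem.List.remove?_eq_none_iff l "").2 hn] at h
    cases h
  rw [PySem.List.remove?_eq_some_erase l "" hm] at h
  cases h
  have h0 : 0 < l.length := List.length_pos_of_mem hm
  simp [List.length_erase, hm]
  omega

def ins_decode (instruction : String) : List String :=
  let temp1 := PySem.Str.replace instruction "," "%"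
  let temp2 := PySem.Str.replace temp1 "(" "%"
  let temp3 := PySem.Str.replace temp2 ")" "%"
  let temp4 := PySem.Str.replace temp3 " " "%"
  -- temp4.split('%') ('%' is a non-empty separator, so split? is exactly splitOn)
  let temp5 := (PySem.Chars.splitOn temp4.toList ['%']).map String.ofList
  pvRemoveLoop temp5

-- ===== PORT B =====
def ins_decode_alt (instruction : String) : List String :=
  let st := instruction.toList.foldl
    (fun (st : List String × List Char) ch =>
      if [',', '(', ')', ' ', '%'].contains ch then
        if st.2.isEmpty then st else (st.1 ++ [String.ofList st.2], [])
      else (st.1, st.2 ++ [ch]))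
    ([], [])
  if st.2.isEmpty then st.1 else st.1 ++ [String.ofList st.2]

-- ===== PRECONDITION & SPEC =====
def Spec_ins_decode (instruction : String) (out : List String) : Prop := out = ins_decode_alt instruction
instance (instruction : String) (out : List String) : Decidable (Spec_ins_decode instruction out) := by unfold Spec_ins_decode; infer_instance

-- ===== CLAIM (what is proved, stated in full; the proofs are below) =====
def Claim_equal_ins_decode : Prop := ∀ (instruction : String), Dom_ins_decode instruction → Spec_ins_decode instruction (ins_decode instruction)

-- ===== LEMMAS AND PROOFS =====

-- the effective delimiter test (B's membership test, the spec both ports reduce to)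
def pvIsD (c : Char) : Bool := [',', '(', ')', ' ', '%'].contains c

-- s.replace(o, n) for single characters is a map
lemma pvReplaceGo_single (o n : Char) : ∀ (fuel : Nat) (l : List Char), l.length ≤ fuel → ∀ acc,
    PySem.Chars.replace.go [o] [n] fuel l acc
      = acc.reverse ++ l.map (fun c => if c == o then n else c) := by
  intro fuel
  induction fuel with
  | zero =>
    intro l hl acc
    have : l = [] := List.eq_nil_of_length_eq_zero (Nat.le_zero.mp hl)
    subst this
    simp [PySem.Chars.replace.go]
  | succ m ih =>
    intro l hl acc
    cases l with
    | nil => simp [PySem.Chars.replace.go]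
    | cons c t =>
      by_cases hc : c = o
      · subst hc
        have hpre : [c].isPrefixOf (c :: t) = true := by simp [List.isPrefixOf]
        simp only [PySem.Chars.replace.go, hpre, if_true]
        rw [show List.drop [c].length (c :: t) = t from rfl]
        rw [ih _ (by simpa using Nat.le_of_succ_le_succ hl)]
        simp
      · have hpre : [o].isPrefixOf (c :: t) = false := by
          simp [List.isPrefixOf]
          exact fun h => hc h.symm
        simp only [PySem.Chars.replace.go, hpre, Bool.false_eq_true, if_false]
        rw [ih _ (by simpa using Nat.le_of_succ_le_succ hl)]
        simp [hc]

lemma pvReplace_single (s : List Char) (o n : Char) :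
    PySem.Chars.replace s [o] [n] = s.map (fun c => if c == o then n else c) := by
  rw [PySem.Chars.replace]
  simp only [List.isEmpty_cons, if_false, Bool.false_eq_true]
  exact pvReplaceGo_single o n s.length s le_rfl []

lemma pvModifyHead_id {α : Type} (l : List α) : l.modifyHead (fun x => x) = l := by
  cases l <;> simp

-- s.split(d) for a single character is List.splitOnP (· == d)
lemma pvSplitOnGo_single (d : Char) : ∀ (fuel : Nat) (l : List Char), l.length < fuel → ∀ cur acc,
    PySem.Chars.splitOn.go [d] fuel l cur acc
      = acc.reverse ++ (l.splitOnP (· == d)).modifyHead (cur.reverse ++ ·) := by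
  intro fuel
  induction fuel with
  | zero => intro l hl; omega
  | succ m ih =>
    intro l hl cur acc
    cases l with
    | nil => simp [PySem.Chars.splitOn.go]
    | cons c t =>
      by_cases hc : c = d
      · subst hc
        have hpre : [c].isPrefixOf (c :: t) = true := by simp [List.isPrefixOf]
        simp only [PySem.Chars.splitOn.go, hpre, if_true]
        rw [show List.drop [c].length (c :: t) = t from rfl]
        rw [ih t (by simpa using Nat.lt_of_succ_lt_succ hl)]
        simp [List.splitOnP_cons, pvModifyHead_id]
      · have hpre : [d].isPrefixOf (c :: t) = false := by
          simp [List.isPrefixOf]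
          exact fun h => hc h.symm
        simp only [PySem.Chars.splitOn.go, hpre, Bool.false_eq_true, if_false]
        rw [ih t (by simpa using Nat.lt_of_succ_lt_succ hl)]
        rw [List.splitOnP_cons]
        simp only [hc, if_neg, beq_iff_eq, if_false]
        rcases h : t.splitOnP (· == d) with _ | ⟨p, ps⟩
        · exact absurd h (List.splitOnP_ne_nil _ t)
        · simp

lemma pvSplitOn_single (s : List Char) (d : Char) :
    PySem.Chars.splitOn s [d] = s.splitOnP (· == d) := by
  rw [PySem.Chars.splitOn, pvSplitOnGo_single d (s.length + 1) s (Nat.lt_succ_self _) [] []]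
  rcases h : s.splitOnP (· == d) with _ | ⟨p, ps⟩
  · exact absurd h (List.splitOnP_ne_nil _ s)
  · simp

-- the while-remove loop removes every '' (first occurrence each time = all of them)
lemma pvFilter_erase_empty (l : List String) :
    (l.erase "").filter (fun x => !(x == "")) = l.filter (fun x => !(x == "")) := by
  induction l with
  | nil => simp
  | cons a t ih =>
    by_cases ha : a = ""
    · subst ha; simp [List.erase_cons]
    · have hb : (a == "") = false := by simpa using ha
      rw [List.erase_cons_tail (by simpa using hb)]
      simp only [List.filter_cons, hb]
      rw [ih]

lemma pvRemoveLoop_eq_filter (l : List String) :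
    pvRemoveLoop l = l.filter (fun x => !(x == "")) := by
  induction hn : l.length using Nat.strong_induction_on generalizing l with
  | _ n ih =>
    rw [pvRemoveLoop]
    split
    · next l' h =>
      have hm : "" ∈ l := by
        by_contra hnm
        rw [(PySem.List.remove?_eq_none_iff l "").2 hnm] at h
        cases h
      rw [PySem.List.remove?_eq_some_erase l "" hm] at h
      cases h
      have h0 : 0 < l.length := List.length_pos_of_mem hm
      rw [ih (l.erase "").length (by simp [List.length_erase, hm]; omega) _ rfl]
      exact pvFilter_erase_empty l
    · next h =>
      have hm : "" ∉ l := (PySem.List.remove?_eq_none_iff l "").1 h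
      refine (List.filter_eq_self.mpr ?_).symm
      intro x hx
      have : x ≠ "" := fun he => hm (he ▸ hx)
      simpa using this

-- splitOnP over a mapped list
lemma pvSplitOnP_map (f : Char → Char) (p : Char → Bool) (s : List Char) :
    (s.map f).splitOnP p = (s.splitOnP (fun c => p (f c))).map (List.map f) := by
  induction s with
  | nil => simp [List.splitOnP_nil]
  | cons c t ih =>
    simp only [List.map_cons, List.splitOnP_cons, ih]
    by_cases h : p (f c)
    · simp [h]
    · simp only [h, if_neg, Bool.false_eq_true, if_false]
      rcases ht : t.splitOnP (fun c => p (f c)) with _ | ⟨q, qs⟩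
      · exact absurd ht (List.splitOnP_ne_nil _ t)
      · simp

-- every character of every piece of splitOnP fails the predicate
lemma pvSplitOnP_chars (p : Char → Bool) (s : List Char) :
    ∀ piece ∈ s.splitOnP p, ∀ c ∈ piece, p c = false := by
  induction s with
  | nil => simp [List.splitOnP_nil]
  | cons c t ih =>
    rw [List.splitOnP_cons]
    by_cases h : p c
    · simp only [h, if_true]
      intro piece hp
      rcases List.mem_cons.mp hp with h' | h'
      · subst h'; simp
      · exact ih piece h'
    · simp only [h, Bool.false_eq_true, if_false]
      rcases ht : t.splitOnP p with _ | ⟨q, qs⟩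
      · exact absurd ht (List.splitOnP_ne_nil _ t)
      · intro piece hp
        rcases List.mem_cons.mp (by simpa using hp) with h' | h'
        · subst h'
          intro x hx
          rcases List.mem_cons.mp hx with h'' | h''
          · subst h''; simpa using h
          · exact ih q (by simp [ht]) x h''
        · exact ih piece (by simp [ht, h'])

-- String.ofList is '' exactly on []
lemma pvOfList_eq_empty (l : List Char) : (String.ofList l == "") = (l == []) := by
  rcases l with _ | ⟨c, t⟩
  · simp
  · have : String.ofList (c :: t) ≠ "" := by
      intro h
      have := congrArg String.toList h
      simp at this
    simp [this]

-- B's scan loop invariant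
lemma pvScan_inv (s : List Char) : ∀ (toks : List String) (buf : List Char),
    (let st := s.foldl
        (fun (st : List String × List Char) ch =>
          if [',', '(', ')', ' ', '%'].contains ch then
            if st.2.isEmpty then st else (st.1 ++ [String.ofList st.2], [])
          else (st.1, st.2 ++ [ch]))
        (toks, buf)
     if st.2.isEmpty then st.1 else st.1 ++ [String.ofList st.2])
      = toks ++ (((s.splitOnP pvIsD).modifyHead (buf ++ ·)).filter (fun p => !(p == []))).map String.ofList := by
  induction s with
  | nil =>
    intro toks buf
    rcases buf with _ | ⟨c, t⟩ <;> simp [List.splitOnP_nil]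
  | cons c t ih =>
    intro toks buf
    by_cases hc : pvIsD c = true
    · have hc' : [',', '(', ')', ' ', '%'].contains c = true := hc
      simp only [List.foldl_cons, hc', if_true]
      by_cases hb : buf = []
      · subst hb
        simp only [List.isEmpty_nil, if_true]
        rw [ih toks [], List.splitOnP_cons, if_pos hc]
        simp [List.filter_cons, pvModifyHead_id]
      · have hb' : buf.isEmpty = false := by simpa using hb
        simp only [hb', Bool.false_eq_true, if_false]
        rw [ih (toks ++ [String.ofList buf]) [], List.splitOnP_cons, if_pos hc]
        simp [List.filter_cons, hb, pvModifyHead_id]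
    · have hcb : pvIsD c = false := by simpa using hc
      have hc' : [',', '(', ')', ' ', '%'].contains c = false := hcb
      simp only [List.foldl_cons, hc', Bool.false_eq_true, if_false]
      rw [ih toks (buf ++ [c]), List.splitOnP_cons]
      simp only [hcb, Bool.false_eq_true, if_false]
      rcases ht : t.splitOnP pvIsD with _ | ⟨q, qs⟩
      · exact absurd ht (List.splitOnP_ne_nil _ t)
      · simp

-- A reduces to: split on the delimiter predicate, drop empties, stringify
lemma pvA_eq (s : String) :
    ins_decode s = (((s.toList.splitOnP pvIsD)).filter (fun p => !(p == []))).map String.ofList := by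
  show pvRemoveLoop _ = _
  rw [pvRemoveLoop_eq_filter]
  have htl : ∀ (u : String) (o n : String),
      (PySem.Str.replace u o n).toList = PySem.Chars.replace u.toList o.toList n.toList := by
    intro u o n; simp [PySem.Str.replace]
  rw [htl, htl, htl, htl]
  simp only [show (",".toList) = [','] from rfl, show ("(".toList) = ['('] from rfl,
    show (")".toList) = [')'] from rfl, show (" ".toList) = [' '] from rfl,
    show ("%".toList) = ['%'] from rfl]
  rw [pvReplace_single, pvReplace_single, pvReplace_single, pvReplace_single]
  simp only [List.map_map]
  have hcomp : s.toList.map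
      ((fun c => if c == ' ' then '%' else c) ∘ (fun c => if c == ')' then '%' else c) ∘
       (fun c => if c == '(' then '%' else c) ∘ (fun c => if c == ',' then '%' else c))
      = s.toList.map (fun c => if pvIsD c && !(c == '%') then '%' else c) := by
    apply List.map_congr_left
    intro c _
    simp only [Function.comp, pvIsD, List.contains_cons]
    by_cases h1 : c = ',' <;> by_cases h2 : c = '(' <;> by_cases h3 : c = ')' <;>
      by_cases h4 : c = ' ' <;> by_cases h5 : c = '%' <;>
      simp_all <;> rfl
  rw [hcomp, pvSplitOn_single, pvSplitOnP_map]
  have hpred : (fun c => ((if pvIsD c && !(c == '%') then '%' else c) == '%')) = pvIsD := by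
    funext c
    by_cases h5 : c = '%'
    · subst h5; simp [pvIsD]
    · by_cases hd : pvIsD c <;> simp_all
  rw [hpred]
  have hpieces : (s.toList.splitOnP pvIsD).map
      (List.map (fun c => if pvIsD c && !(c == '%') then '%' else c))
      = s.toList.splitOnP pvIsD := by
    refine (List.map_congr_left ?_).trans (List.map_id _)
    intro piece hp
    have hch := pvSplitOnP_chars pvIsD s.toList piece hp
    refine (List.map_congr_left ?_).trans (List.map_id piece)
    intro c hcm
    simp [hch c hcm]
  rw [hpieces]
  rw [List.filter_map]
  congr 1
  apply List.filter_congr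
  intro p _
  simp only [Function.comp]
  rw [pvOfList_eq_empty]

-- ===== VERDICT (by name: the statement is the Claim_ definition above) =====
theorem ins_decode_spec : Claim_equal_ins_decode := by
  intro s _
  show ins_decode s = ins_decode_alt s
  have hB : ins_decode_alt s
      = ((s.toList.splitOnP pvIsD).filter (fun p => !(p == []))).map String.ofList := by
    unfold ins_decode_alt
    rw [pvScan_inv s.toList [] []]
    rcases h : s.toList.splitOnP pvIsD with _ | ⟨q, qs⟩
    · exact absurd h (List.splitOnP_ne_nil _ s.toList)
    · simp
  rw [pvA_eq, hB]
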